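-- pv_equiv track=rewrite | github.com/jennifer-hunter/Power_BI_agent_KB | report_reformatter.py | group_visuals_by_type
-- ===== SOURCE A (Python) =====
-- KPI_TYPES = ['card', 'cardVisual', 'multiRowCard', 'kpi']
--
-- CHART_TYPES = [
--     'clusteredBarChart', 'clusteredColumnChart', 'lineChart', 'barChart',
--     'pieChart', 'donutChart', 'areaChart', 'waterfallChart', 'stackedBarChart',
--     'stackedColumnChart', 'lineClusteredColumnComboChart', 'scatterChart',
--     'treemap', 'funnel', 'gauge', 'ribbonChart', 'filledMap', 'map', 'shapeMap'
-- ]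
--
-- TABLE_TYPES = ['tableEx', 'pivotTable', 'matrix', 'table']
--
-- SLICER_TYPES = ['slicer', 'advancedSlicerVisual']
--
-- def get_visual_type(visual_data: dict) -> str:
--     """Extract visual type from visual data."""
--     return visual_data.get('visual', {}).get('visualType', 'unknown')
--
-- def categorize_visual(visual_type: str) -> str:
--     """Categorize a visual type into: slicer, kpi, chart, table, or other."""
--     if visual_type in SLICER_TYPES:
--         return 'slicer'
--     elif visual_type in KPI_TYPES:
--         return 'kpi'
--     elif visual_type in CHART_TYPES:
--         return 'chart'
--     elif visual_type in TABLE_TYPES: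
--         return 'table'
--     else:
--         return 'other'
--
-- def group_visuals_by_type(visuals: list) -> dict:
--     """
--     Group visuals by their category.
--
--     Returns dict with keys: slicers, kpis, charts, tables, other
--     """
--     grouped = {
--         'slicers': [],
--         'kpis': [],
--         'charts': [],
--         'tables': [],
--         'other': []
--     }
--
--     for v in visuals:
--         visual_type = get_visual_type(v)
--         category = categorize_visual(visual_type)
--
--         if category == 'slicer':
--             grouped['slicers'].append(v)
--         elif category == 'kpi':
--             grouped['kpis'].append(v)
--         elif category == 'chart':
--             grouped['charts'].append(v)
--         elif category == 'table':
--             grouped['tables'].append(v)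
--         else:
--             grouped['other'].append(v)
--
--     return grouped
-- ===== SOURCE B (Python) =====
-- KPI_TYPES = ['card', 'cardVisual', 'multiRowCard', 'kpi']
--
-- CHART_TYPES = [
--     'clusteredBarChart', 'clusteredColumnChart', 'lineChart', 'barChart',
--     'pieChart', 'donutChart', 'areaChart', 'waterfallChart', 'stackedBarChart',
--     'stackedColumnChart', 'lineClusteredColumnComboChart', 'scatterChart',
--     'treemap', 'funnel', 'gauge', 'ribbonChart', 'filledMap', 'map', 'shapeMap'
-- ]
--
-- TABLE_TYPES = ['tableEx', 'pivotTable', 'matrix', 'table']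
--
-- SLICER_TYPES = ['slicer', 'advancedSlicerVisual']
--
-- # B: staged filter passes instead of A's single classifying pass.  First tag each
-- # visual with its type once; then each output bucket is an independent filter of
-- # the tagged list.  Correct because the four category lists are pairwise
-- # disjoint (each type belongs to exactly one bucket) and filtering is stable,
-- # so each bucket receives the same visuals in the same order as A's appends.
-- def group_visuals_by_type(visuals: list) -> dict:
--     keyed = [(v.get('visual', {}).get('visualType', 'unknown'), v) for v in visuals]
--     known = SLICER_TYPES + KPI_TYPES + CHART_TYPES + TABLE_TYPES
--     return {
--         'slicers': [v for t, v in keyed if t in SLICER_TYPES],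
--         'kpis':    [v for t, v in keyed if t in KPI_TYPES],
--         'charts':  [v for t, v in keyed if t in CHART_TYPES],
--         'tables':  [v for t, v in keyed if t in TABLE_TYPES],
--         'other':   [v for t, v in keyed if t not in known],
--     }
-- ===== Notes on version B (the rewrite author's own statement) =====
-- stated objective: alternative
-- what changed: Replaced A's single-pass accumulator with a branch cascade appending into five mutable buckets by a tag-then-filter decomposition: each output bucket is built as an independent stable filter over a once-computed (type, visual) list, correct because the category lists are pairwise disjoint.
import Mathlib
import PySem

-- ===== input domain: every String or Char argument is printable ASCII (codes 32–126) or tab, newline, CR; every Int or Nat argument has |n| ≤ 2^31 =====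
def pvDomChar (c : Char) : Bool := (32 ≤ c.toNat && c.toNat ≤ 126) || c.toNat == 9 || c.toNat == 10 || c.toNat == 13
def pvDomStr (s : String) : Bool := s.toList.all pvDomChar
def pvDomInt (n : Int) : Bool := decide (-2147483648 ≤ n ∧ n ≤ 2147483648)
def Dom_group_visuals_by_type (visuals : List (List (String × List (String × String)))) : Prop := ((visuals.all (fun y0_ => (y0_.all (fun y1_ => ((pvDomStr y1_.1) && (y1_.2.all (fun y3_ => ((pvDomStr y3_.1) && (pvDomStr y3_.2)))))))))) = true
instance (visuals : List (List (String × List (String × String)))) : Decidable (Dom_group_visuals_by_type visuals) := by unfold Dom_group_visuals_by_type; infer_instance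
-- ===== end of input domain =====

-- B replaces A's single accumulating pass (branch cascade appending into five
-- mutable buckets) by a tag-then-filter decomposition: tag each visual with its
-- type once, then build each bucket as an independent stable filter
-- (objective: alternative; equal because the category lists are disjoint).

-- ===== PORT A =====
def pvKpiTypes : List String := ["card", "cardVisual", "multiRowCard", "kpi"]
def pvChartTypes : List String :=
  ["clusteredBarChart", "clusteredColumnChart", "lineChart", "barChart",
   "pieChart", "donutChart", "areaChart", "waterfallChart", "stackedBarChart",
   "stackedColumnChart", "lineClusteredColumnComboChart", "scatterChart",
   "treemap", "funnel", "gauge", "ribbonChart", "filledMap", "map", "shapeMap"]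
def pvTableTypes : List String := ["tableEx", "pivotTable", "matrix", "table"]
def pvSlicerTypes : List String := ["slicer", "advancedSlicerVisual"]

-- get_visual_type: visual_data.get('visual', {}).get('visualType', 'unknown')
def pvGetVisualType (v : List (String × List (String × String))) : String :=
  PySem.Dict.getD (PySem.Dict.mk ((PySem.Dict.mk v).getD "visual" [])) "visualType" "unknown"

-- categorize_visual: the if/elif membership cascade
def pvCategorize (vt : String) : String :=
  if pvSlicerTypes.contains vt then "slicer"
  else if pvKpiTypes.contains vt then "kpi"
  else if pvChartTypes.contains vt then "chart"
  else if pvTableTypes.contains vt then "table"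
  else "other"

-- the body of A's for-loop
def pvStepA (g : PySem.Dict String (List (List (String × List (String × String)))))
    (v : List (String × List (String × String))) :
    PySem.Dict String (List (List (String × List (String × String)))) :=
  let vt := pvGetVisualType v
  let cat := pvCategorize vt
  if cat = "slicer" then g.modify "slicers" [] (· ++ [v])
  else if cat = "kpi" then g.modify "kpis" [] (· ++ [v])
  else if cat = "chart" then g.modify "charts" [] (· ++ [v])
  else if cat = "table" then g.modify "tables" [] (· ++ [v])
  else g.modify "other" [] (· ++ [v])

def group_visuals_by_type (visuals : List (List (String × List (String × String)))) : List (String × List (List (String × List (String × String)))) :=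
  (visuals.foldl pvStepA
    (PySem.Dict.mk [("slicers", []), ("kpis", []), ("charts", []), ("tables", []), ("other", [])])).items

-- ===== PORT B =====
def group_visuals_by_type_alt (visuals : List (List (String × List (String × String)))) : List (String × List (List (String × List (String × String)))) :=
  let keyed := visuals.map (fun v => (pvGetVisualType v, v))
  let known := pvSlicerTypes ++ pvKpiTypes ++ pvChartTypes ++ pvTableTypes
  [("slicers", (keyed.filter (fun p => pvSlicerTypes.contains p.1)).map (·.2)),
   ("kpis",    (keyed.filter (fun p => pvKpiTypes.contains p.1)).map (·.2)),
   ("charts",  (keyed.filter (fun p => pvChartTypes.contains p.1)).map (·.2)),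
   ("tables",  (keyed.filter (fun p => pvTableTypes.contains p.1)).map (·.2)),
   ("other",   (keyed.filter (fun p => !known.contains p.1)).map (·.2))]

-- ===== PRECONDITION & SPEC =====
def Spec_group_visuals_by_type (visuals : List (List (String × List (String × String)))) (out : List (String × List (List (String × List (String × String))))) : Prop := out = group_visuals_by_type_alt visuals
instance (visuals : List (List (String × List (String × String)))) (out : List (String × List (List (String × List (String × String))))) : Decidable (Spec_group_visuals_by_type visuals out) := by
  unfold Spec_group_visuals_by_type
  have i1 : DecidableEq (String × String) := inferInstance
  have i2 : DecidableEq (List (String × String)) := @instDecidableEqList _ i1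
  have i3 : DecidableEq (String × List (String × String)) := @instDecidableEqProd _ _ _ i2
  have i4 : DecidableEq (List (String × List (String × String))) := @instDecidableEqList _ i3
  have i5 : DecidableEq (List (List (String × List (String × String)))) := @instDecidableEqList _ i4
  have i6 : DecidableEq (String × List (List (String × List (String × String)))) := @instDecidableEqProd _ _ _ i5
  exact @instDecidableEqList _ i6 out (group_visuals_by_type_alt visuals)

-- ===== CLAIM (what is proved, stated in full; the proofs are below) =====
def Claim_equal_group_visuals_by_type : Prop := ∀ (visuals : List (List (String × List (String × String)))), Dom_group_visuals_by_type visuals → Spec_group_visuals_by_type visuals (group_visuals_by_type visuals)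

-- ===== LEMMAS AND PROOFS =====

-- the five bucket builders of B, named for the proof (equal to B's components by rfl)
def pvFilt (ts : List String) (vs : List (List (String × List (String × String)))) :
    List (List (String × List (String × String))) :=
  ((vs.map (fun v => (pvGetVisualType v, v))).filter (fun p => ts.contains p.1)).map (·.2)

def pvFiltO (vs : List (List (String × List (String × String)))) :
    List (List (String × List (String × String))) :=
  ((vs.map (fun v => (pvGetVisualType v, v))).filter
      (fun p => !(pvSlicerTypes ++ pvKpiTypes ++ pvChartTypes ++ pvTableTypes).contains p.1)).map (·.2)

lemma alt_eq (vs : List (List (String × List (String × String)))) :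
    group_visuals_by_type_alt vs =
      [("slicers", pvFilt pvSlicerTypes vs), ("kpis", pvFilt pvKpiTypes vs),
       ("charts", pvFilt pvChartTypes vs), ("tables", pvFilt pvTableTypes vs),
       ("other", pvFiltO vs)] := rfl

lemma pvFilt_cons (ts : List String) (v : List (String × List (String × String))) (vs) :
    pvFilt ts (v :: vs) =
      if ts.contains (pvGetVisualType v) then v :: pvFilt ts vs else pvFilt ts vs := by
  simp only [pvFilt, List.map_cons, List.filter_cons]
  split <;> simp

lemma pvFiltO_cons (v : List (String × List (String × String))) (vs) :
    pvFiltO (v :: vs) =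
      if !(pvSlicerTypes ++ pvKpiTypes ++ pvChartTypes ++ pvTableTypes).contains (pvGetVisualType v)
      then v :: pvFiltO vs else pvFiltO vs := by
  simp only [pvFiltO, List.map_cons, List.filter_cons]
  split <;> simp

-- the loop invariant: folding A's step over vs starting from arbitrary buckets
lemma loop_inv (vs : List (List (String × List (String × String))))
    (a1 a2 a3 a4 a5 : List (List (String × List (String × String)))) :
    (vs.foldl pvStepA (PySem.Dict.mk
        [("slicers", a1), ("kpis", a2), ("charts", a3), ("tables", a4), ("other", a5)])).items =
      [("slicers", a1 ++ pvFilt pvSlicerTypes vs), ("kpis", a2 ++ pvFilt pvKpiTypes vs),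
       ("charts", a3 ++ pvFilt pvChartTypes vs), ("tables", a4 ++ pvFilt pvTableTypes vs),
       ("other", a5 ++ pvFiltO vs)] := by
  induction vs generalizing a1 a2 a3 a4 a5 with
  | nil => simp [pvFilt, pvFiltO]
  | cons v vs ih =>
    rw [List.foldl_cons]
    by_cases h1 : pvSlicerTypes.contains (pvGetVisualType v)
    · simp only [pvSlicerTypes, List.contains_cons, List.contains_nil, Bool.or_false, Bool.or_eq_true, beq_iff_eq] at h1
      rcases h1 with h | h <;> (
        have c : pvCategorize (pvGetVisualType v) = "slicer" := by rw [h]; decide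
        have hv : pvStepA (PySem.Dict.mk
            [("slicers", a1), ("kpis", a2), ("charts", a3), ("tables", a4), ("other", a5)]) v =
            PySem.Dict.mk [("slicers", a1 ++ [v]), ("kpis", a2), ("charts", a3), ("tables", a4), ("other", a5)] := by
          simp only [pvStepA, c]
          simp [PySem.Dict.modify, PySem.Dict.insert, PySem.Dict.getD, PySem.Dict.get?, PySem.Dict.contains]
        rw [hv, ih, pvFilt_cons, pvFilt_cons, pvFilt_cons, pvFilt_cons, pvFiltO_cons]
        simp
        try (rw [h]; decide))
    · by_cases h2 : pvKpiTypes.contains (pvGetVisualType v)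
      · simp only [pvKpiTypes, List.contains_cons, List.contains_nil, Bool.or_false, Bool.or_eq_true, beq_iff_eq] at h2
        rcases h2 with h | h | h | h <;> (
          have c : pvCategorize (pvGetVisualType v) = "kpi" := by rw [h]; decide
          have hv : pvStepA (PySem.Dict.mk
              [("slicers", a1), ("kpis", a2), ("charts", a3), ("tables", a4), ("other", a5)]) v =
              PySem.Dict.mk [("slicers", a1), ("kpis", a2 ++ [v]), ("charts", a3), ("tables", a4), ("other", a5)] := by
            simp only [pvStepA, c]
            simp [PySem.Dict.modify, PySem.Dict.insert, PySem.Dict.getD, PySem.Dict.get?, PySem.Dict.contains]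
          rw [hv, ih, pvFilt_cons, pvFilt_cons, pvFilt_cons, pvFilt_cons, pvFiltO_cons]
          simp
          try (rw [h]; decide))
      · by_cases h3 : pvChartTypes.contains (pvGetVisualType v)
        · simp only [pvChartTypes, List.contains_cons, List.contains_nil, Bool.or_false, Bool.or_eq_true, beq_iff_eq] at h3
          rcases h3 with h | h | h | h | h | h | h | h | h | h | h | h | h | h | h | h | h | h | h <;> (
            have c : pvCategorize (pvGetVisualType v) = "chart" := by rw [h]; decide
            have hv : pvStepA (PySem.Dict.mk
                [("slicers", a1), ("kpis", a2), ("charts", a3), ("tables", a4), ("other", a5)]) v =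
                PySem.Dict.mk [("slicers", a1), ("kpis", a2), ("charts", a3 ++ [v]), ("tables", a4), ("other", a5)] := by
              simp only [pvStepA, c]
              simp [PySem.Dict.modify, PySem.Dict.insert, PySem.Dict.getD, PySem.Dict.get?, PySem.Dict.contains]
            rw [hv, ih, pvFilt_cons, pvFilt_cons, pvFilt_cons, pvFilt_cons, pvFiltO_cons]
            simp
            try (rw [h]; decide))
        · by_cases h4 : pvTableTypes.contains (pvGetVisualType v)
          · simp only [pvTableTypes, List.contains_cons, List.contains_nil, Bool.or_false, Bool.or_eq_true, beq_iff_eq] at h4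
            rcases h4 with h | h | h | h <;> (
              have c : pvCategorize (pvGetVisualType v) = "table" := by rw [h]; decide
              have hv : pvStepA (PySem.Dict.mk
                  [("slicers", a1), ("kpis", a2), ("charts", a3), ("tables", a4), ("other", a5)]) v =
                  PySem.Dict.mk [("slicers", a1), ("kpis", a2), ("charts", a3), ("tables", a4 ++ [v]), ("other", a5)] := by
                simp only [pvStepA, c]
                simp [PySem.Dict.modify, PySem.Dict.insert, PySem.Dict.getD, PySem.Dict.get?, PySem.Dict.contains]
              rw [hv, ih, pvFilt_cons, pvFilt_cons, pvFilt_cons, pvFilt_cons, pvFiltO_cons]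
              simp
              try (rw [h]; decide))
          · have m1 := h1; have m2 := h2; have m3 := h3; have m4 := h4
            simp only [List.contains_eq_mem, decide_eq_true_eq] at m1 m2 m3 m4
            simp only [Bool.not_eq_true] at h1 h2 h3 h4
            have c : pvCategorize (pvGetVisualType v) = "other" := by
              simp only [pvCategorize, h1, h2, h3, h4, Bool.false_eq_true, if_false]
            have bK : (pvSlicerTypes ++ pvKpiTypes ++ pvChartTypes ++ pvTableTypes).contains (pvGetVisualType v) = false := by
              simp only [List.contains_append, h1, h2, h3, h4, Bool.or_self]
            have hv : pvStepA (PySem.Dict.mk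
                [("slicers", a1), ("kpis", a2), ("charts", a3), ("tables", a4), ("other", a5)]) v =
                PySem.Dict.mk [("slicers", a1), ("kpis", a2), ("charts", a3), ("tables", a4), ("other", a5 ++ [v])] := by
              simp only [pvStepA, c]
              simp [PySem.Dict.modify, PySem.Dict.insert, PySem.Dict.getD, PySem.Dict.get?, PySem.Dict.contains]
            rw [hv, ih, pvFilt_cons, pvFilt_cons, pvFilt_cons, pvFilt_cons, pvFiltO_cons]
            simp [m1, m2, m3, m4]

-- ===== VERDICT (by name: the statement is the Claim_ definition above) =====
theorem group_visuals_by_type_spec : Claim_equal_group_visuals_by_type := by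
  intro visuals _
  show group_visuals_by_type visuals = group_visuals_by_type_alt visuals
  rw [alt_eq]
  unfold group_visuals_by_type
  rw [loop_inv]
  simp
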